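-- pv_equiv track=rewrite | github.com/mohasbks/AI-MarketingX | src/integrations/facebook_ads_client.py | _process_demographics
-- ===== SOURCE A (Python) =====
-- from typing import Dict, List
--
-- def _process_demographics(insights: List) -> Dict:
--     """Process demographic data from insights"""
--     demographics = {
--         'age_groups': {},
--         'gender': {},
--         'countries': {}
--     }
--
--     for insight in insights:
--         # Process age groups
--         age = insight.get('age')
--         if age:
--             demographics['age_groups'][age] = demographics['age_groups'].get(age, 0) + 1
--
--         # Process gender
--         gender = insight.get('gender')
--         if gender:
--             demographics['gender'][gender] = demographics['gender'].get(gender, 0) + 1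
--
--         # Process countries
--         country = insight.get('country')
--         if country:
--             demographics['countries'][country] = demographics['countries'].get(country, 0) + 1
--
--     return demographics
-- ===== SOURCE B (Python) =====
-- from typing import Dict, List
--
-- def _process_demographics(insights: List) -> Dict:
--     """Process demographic data via dedup-then-count passes (no running counters)"""
--     def tally(key):
--         vals = [v for v in (i.get(key) for i in insights) if v]
--         seen = []
--         for v in vals:
--             if v not in seen:
--                 seen.append(v)
--         return {v: vals.count(v) for v in seen}
--     return {
--         'age_groups': tally('age'),
--         'gender': tally('gender'),
--         'countries': tally('country')
--     }
-- ===== Notes on version B (the rewrite author's own statement) =====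
-- stated objective: alternative
-- what changed: Instead of A's single pass that maintains three frequency dicts with get-then-increment updates, B extracts each key's truthy values, deduplicates them to their first occurrences, and computes each distinct value's frequency with a separate list.count scan (no incremental counters); it trades A's O(n) counting for O(n*k) nested scans.
import Mathlib
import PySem

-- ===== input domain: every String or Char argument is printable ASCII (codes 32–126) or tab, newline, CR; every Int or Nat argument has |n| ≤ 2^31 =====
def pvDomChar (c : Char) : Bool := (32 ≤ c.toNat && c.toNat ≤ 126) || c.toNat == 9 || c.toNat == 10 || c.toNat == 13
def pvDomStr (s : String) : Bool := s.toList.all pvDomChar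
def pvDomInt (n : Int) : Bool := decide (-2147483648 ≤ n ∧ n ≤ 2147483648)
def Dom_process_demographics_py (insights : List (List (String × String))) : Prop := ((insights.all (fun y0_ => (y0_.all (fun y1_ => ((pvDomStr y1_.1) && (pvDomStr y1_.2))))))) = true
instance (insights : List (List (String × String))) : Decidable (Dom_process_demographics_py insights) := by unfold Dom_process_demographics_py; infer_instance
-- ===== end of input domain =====

-- B replaces A's single-pass running-counter loop by dedup-to-first-occurrences then a per-value count scan (alternative decomposition; same results).

-- ===== PORT A =====
-- one demographic block of A's loop body: 'v = insight.get(key); if v: d[v] = d.get(v, 0) + 1'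
def pvUpdA (key : String) (d : PySem.Dict String Int) (insight : List (String × String)) :
    PySem.Dict String Int :=
  match (PySem.Dict.mk insight).get? key with
  | some v => if v ≠ "" then d.insert v (d.getD v 0 + 1) else d
  | none => d

def process_demographics_py (insights : List (List (String × String))) :
    List (String × List (String × Int)) :=
  let st := insights.foldl
    (fun st insight =>
      (pvUpdA "age" st.1 insight,
       pvUpdA "gender" st.2.1 insight,
       pvUpdA "country" st.2.2 insight))
    (PySem.Dict.empty, PySem.Dict.empty, PySem.Dict.empty)
  [("age_groups", st.1.items), ("gender", st.2.1.items), ("countries", st.2.2.items)]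

-- ===== PORT B =====
-- '[v for v in (i.get(key) for i in insights) if v]' : the truthy values of that key, in order
def pvVals (key : String) (insights : List (List (String × String))) : List String :=
  insights.filterMap (fun i =>
    match (PySem.Dict.mk i).get? key with
    | some v => if v ≠ "" then some v else none
    | none => none)

-- 'seen = []; for v in vals: if v not in seen: seen.append(v)' then '{v: vals.count(v) for v in seen}'
def pvTallyB (key : String) (insights : List (List (String × String))) : List (String × Int) :=
  let vals := pvVals key insights
  let seen : PySem.Set String := vals.foldl PySem.Set.add PySem.Set.empty
  seen.map (fun v => (v, (vals.count v : Int)))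

def process_demographics_py_alt (insights : List (List (String × String))) :
    List (String × List (String × Int)) :=
  [("age_groups", pvTallyB "age" insights),
   ("gender", pvTallyB "gender" insights),
   ("countries", pvTallyB "country" insights)]

-- ===== PRECONDITION & SPEC =====
def Spec_process_demographics_py (insights : List (List (String × String))) (out : List (String × List (String × Int))) : Prop := out = process_demographics_py_alt insights
instance (insights : List (List (String × String))) (out : List (String × List (String × Int))) : Decidable (Spec_process_demographics_py insights out) := by unfold Spec_process_demographics_py; infer_instance

-- ===== CLAIM (what is proved, stated in full; the proofs are below) =====
def Claim_equal_process_demographics_py : Prop := ∀ (insights : List (List (String × String))), Dom_process_demographics_py insights → Spec_process_demographics_py insights (process_demographics_py insights)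

-- ===== LEMMAS AND PROOFS =====

-- the combined fold over the state triple is the triple of the per-field folds
theorem pv_foldl_triple (insights : List (List (String × String)))
    (da dg dc : PySem.Dict String Int) :
    insights.foldl
      (fun st insight =>
        (pvUpdA "age" st.1 insight,
         pvUpdA "gender" st.2.1 insight,
         pvUpdA "country" st.2.2 insight)) (da, dg, dc)
    = (insights.foldl (pvUpdA "age") da,
       insights.foldl (pvUpdA "gender") dg,
       insights.foldl (pvUpdA "country") dc) := by
  induction insights generalizing da dg dc with
  | nil => rfl
  | cons i t ih => simp [List.foldl_cons, ih]

-- A's per-field fold is the insert-counting fold over the filtered value list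
theorem pv_foldl_field (key : String) (insights : List (List (String × String)))
    (d : PySem.Dict String Int) :
    insights.foldl (pvUpdA key) d
    = (pvVals key insights).foldl (fun d v => d.insert v (d.getD v 0 + 1)) d := by
  induction insights generalizing d with
  | nil => rfl
  | cons i t ih =>
    simp only [List.foldl_cons]
    cases h : (PySem.Dict.mk i).get? key with
    | none =>
      have hvals : pvVals key (i :: t) = pvVals key t := by
        simp [pvVals, h]
      rw [hvals]
      simpa [pvUpdA, h] using ih d
    | some v =>
      by_cases hv : v = ""
      · have hvals : pvVals key (i :: t) = pvVals key t := by
          simp [pvVals, h, hv]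
        rw [hvals]
        simpa [pvUpdA, h, hv] using ih d
      · have hvals : pvVals key (i :: t) = v :: pvVals key t := by
          simp [pvVals, h, hv]
        rw [hvals]
        simp only [List.foldl_cons]
        simpa [pvUpdA, h, hv] using ih (d.insert v (d.getD v 0 + 1))

-- A's per-field result, as items, is B's dedup-then-count list
theorem pv_field_eq_tally (key : String) (insights : List (List (String × String))) :
    (insights.foldl (pvUpdA key) PySem.Dict.empty).items = pvTallyB key insights := by
  rw [pv_foldl_field, PySem.Dict.foldl_insert_getD_add_one_eq_counter,
    PySem.Dict.items_counter]
  simp [pvTallyB, PySem.Set.ofList_eq_foldl]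

-- ===== VERDICT (by name: the statement is the Claim_ definition above) =====
theorem process_demographics_py_spec : Claim_equal_process_demographics_py := by
  intro insights _
  show process_demographics_py insights = process_demographics_py_alt insights
  simp only [process_demographics_py, process_demographics_py_alt,
    pv_foldl_triple, pv_field_eq_tally]
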